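-- pv_equiv track=rewrite | github.com/idsia-robotics/Sound-as-Pretext | model_utils.py | _channel_seq
-- ===== SOURCE A (Python) =====
-- def _closest_log2(x, shift=0):
--     return 1 if x < 2 else (x - 1).bit_length() + shift
--
-- def _channel_seq(in_shape, min_length, max_channels, min_channels=16):
--     c = max(min_channels, 2 ** _closest_log2(in_shape[0]))
--     l = 2 ** _closest_log2(min(in_shape[1:]), -1)
--
--     res = [in_shape[0]]
--     while l >= min_length and c <= max_channels:
--         res.append(c)
--         c <<= 1
--         l >>= 1
--
--     if res[-1] < max_channels:
--         res.append(max_channels)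
--
--     return res
-- ===== SOURCE B (Python) =====
-- def _closest_log2(x, shift=0):
--     return 1 if x < 2 else (x - 1).bit_length() + shift
--
-- def _channel_seq(in_shape, min_length, max_channels, min_channels=16):
--     head = in_shape[0]
--     c0 = max(min_channels, 2 ** _closest_log2(head))
--     e = _closest_log2(min(in_shape[1:]), -1)          # l0 = 2**e
--     q = max_channels // c0
--     nc = q.bit_length() if q > 0 else 0               # steps allowed by the channel cap
--     if min_length <= 0:
--         n = nc
--     else:
--         n = min(max(e - (min_length - 1).bit_length() + 1, 0), nc)
--     res = [head] + [c0 << k for k in range(n)]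
--     if res[-1] < max_channels:
--         res.append(max_channels)
--     return res
-- ===== Notes on version B (the rewrite author's own statement) =====
-- stated objective: alternative
-- what changed: A steps a guarded while-loop that doubles c and halves l until one bound is violated; B computes the number of loop iterations in closed form from bit lengths (steps allowed by the channel cap and by the length floor) and builds the list with a single fixed-range fill.
import Mathlib
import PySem

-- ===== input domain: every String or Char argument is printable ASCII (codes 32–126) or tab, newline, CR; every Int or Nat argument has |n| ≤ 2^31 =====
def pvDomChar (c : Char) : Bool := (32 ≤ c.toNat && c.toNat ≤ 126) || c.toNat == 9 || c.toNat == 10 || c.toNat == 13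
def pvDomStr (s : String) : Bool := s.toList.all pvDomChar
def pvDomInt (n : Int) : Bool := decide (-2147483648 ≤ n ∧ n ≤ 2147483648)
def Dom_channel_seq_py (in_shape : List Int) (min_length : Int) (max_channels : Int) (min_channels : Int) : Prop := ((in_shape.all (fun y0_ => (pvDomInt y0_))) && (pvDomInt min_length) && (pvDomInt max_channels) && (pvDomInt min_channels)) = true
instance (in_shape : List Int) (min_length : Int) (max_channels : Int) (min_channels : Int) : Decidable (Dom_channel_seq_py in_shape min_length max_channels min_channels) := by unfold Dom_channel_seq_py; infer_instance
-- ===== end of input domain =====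

-- B replaces A's guarded incremental while-loop by a closed-form computation of the
-- number of loop iterations (from bit lengths) followed by a fixed-range fill
-- (objective: alternative decomposition; same cost, no measured speedup).

-- ===== PORT A =====

-- _closest_log2(x, shift): (x-1).bit_length() + shift, but 1 if x < 2 (shift ignored there)
def closest_log2 (x : Int) (shift : Int) : Int :=
  if x < 2 then 1 else (PySem.Int.bitLength (x - 1) : Int) + shift

-- A's while-loop; the fuel only makes it total: on Dom (|max_channels| ≤ 2^31) the body
-- runs at most bit_length(max_channels // c) ≤ 64 times since c ≥ 2 doubles each step,
-- so fuel 64 is never exhausted on the inputs the claim covers (proved below).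
def chanLoop (min_length max_channels : Int) : Nat → Int → Int → List Int → List Int
  | 0, _, _, res => res
  | fuel + 1, c, l, res =>
    if min_length ≤ l ∧ c ≤ max_channels then
      chanLoop min_length max_channels fuel (c <<< (1:Nat)) (l >>> (1:Nat)) (res ++ [c])
    else res

def channel_seq_py (in_shape : List Int) (min_length : Int) (max_channels : Int) (min_channels : Int) : List Int :=
  match PySem.List.pyGet? in_shape 0,
        PySem.List.min? (PySem.List.slice in_shape (some 1) none) (fun y => y) with
  | some h, some mn =>
    -- both 2** exponents are ≥ 0 (closest_log2 _ 0 ≥ 1, closest_log2 _ (-1) ≥ 0), so .toNat is exact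
    let c := max min_channels ((2:Int) ^ (closest_log2 h 0).toNat)
    let l := (2:Int) ^ (closest_log2 mn (-1)).toNat
    let res := chanLoop min_length max_channels 64 c l [h]
    match PySem.List.pyGet? res (-1) with
    | some last => if last < max_channels then res ++ [max_channels] else res
    | none => res  -- unreachable: res starts from [h]
  | _, _ => []  -- in_shape[0] IndexError or min(in_shape[1:]) ValueError: excluded by Pre_

-- ===== PORT B =====

-- Source B carries its own copy of _closest_log2
def closest_log2B (x : Int) (shift : Int) : Int :=
  if x < 2 then 1 else (PySem.Int.bitLength (x - 1) : Int) + shift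

def channel_seq_py_alt (in_shape : List Int) (min_length : Int) (max_channels : Int) (min_channels : Int) : List Int :=
  (PySem.List.pyGet? in_shape 0).elim []  -- [] only where Python raises; excluded by Pre_
    (fun h =>
      (PySem.List.min? (PySem.List.slice in_shape (some 1) none) (fun y => y)).elim []
        (fun mn =>
          let c0 := max min_channels ((2:Int) ^ (closest_log2B h 0).toNat)
          let e := closest_log2B mn (-1)
          let q := PySem.Int.floordiv max_channels c0
          let nc : Int := if 0 < q then (PySem.Int.bitLength q : Int) else 0
          let n : Int := if min_length ≤ 0 then nc
            else min (max (e - (PySem.Int.bitLength (min_length - 1) : Int) + 1) 0) nc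
          let res := h :: (List.range n.toNat).map (fun k : Nat => c0 <<< k)
          (PySem.List.pyGet? res (-1)).elim res  -- res[-1] always exists here
            (fun last => if last < max_channels then res ++ [max_channels] else res)))

-- ===== PRECONDITION & SPEC =====
-- A (and B) raise on lists with fewer than two elements (in_shape[0] IndexError / min()
-- of an empty sequence ValueError); Pre_ excludes exactly those.
def Pre_channel_seq_py (in_shape : List Int) (min_length : Int) (max_channels : Int) (min_channels : Int) : Prop :=
  2 ≤ in_shape.length
instance (in_shape : List Int) (min_length : Int) (max_channels : Int) (min_channels : Int) : Decidable (Pre_channel_seq_py in_shape min_length max_channels min_channels) := by unfold Pre_channel_seq_py; infer_instance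

def pvWitness_channel_seq_py : List Int × Int × Int × Int := ([3, 1000, 1200], 4, 256, 16)

def Spec_channel_seq_py (in_shape : List Int) (min_length : Int) (max_channels : Int) (min_channels : Int) (out : List Int) : Prop := out = channel_seq_py_alt in_shape min_length max_channels min_channels
instance (in_shape : List Int) (min_length : Int) (max_channels : Int) (min_channels : Int) (out : List Int) : Decidable (Spec_channel_seq_py in_shape min_length max_channels min_channels out) := by unfold Spec_channel_seq_py; infer_instance

-- ===== CLAIM (what is proved, stated in full; the proofs are below) =====
def Claim_equal_channel_seq_py : Prop := ∀ (in_shape : List Int) (min_length : Int) (max_channels : Int) (min_channels : Int), Dom_channel_seq_py in_shape min_length max_channels min_channels → Pre_channel_seq_py in_shape min_length max_channels min_channels → Spec_channel_seq_py in_shape min_length max_channels min_channels (channel_seq_py in_shape min_length max_channels min_channels)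

-- ===== LEMMAS AND PROOFS =====

-- closed-form iteration counts (proof-side mirrors of B's let-bindings)
def ncVal (M c : Int) : Int :=
  if 0 < PySem.Int.floordiv M c then (PySem.Int.bitLength (PySem.Int.floordiv M c) : Int) else 0

def nVal (m M c e : Int) : Int :=
  if m ≤ 0 then ncVal M c
  else min (max (e - (PySem.Int.bitLength (m - 1) : Int) + 1) 0) (ncVal M c)

-- bitLength facts specialised to nonnegative arguments
lemma bitLength_le_of_le {x : Int} {e : Nat} (hx : 0 ≤ x) (h : x < 2 ^ e) :
    PySem.Int.bitLength x ≤ e := by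
  by_contra hgt
  have hx0 : x ≠ 0 := by
    intro h0; subst h0; simp [PySem.Int.bitLength_zero] at hgt
  have h1 := PySem.Int.two_pow_bitLength_le x hx0
  have h2 : (2:Nat) ^ e ≤ 2 ^ (PySem.Int.bitLength x - 1) :=
    Nat.pow_le_pow_right (by norm_num) (by omega)
  have hpow : (((2:Nat) ^ e : Nat) : Int) = (2:Int) ^ e := by push_cast; ring
  omega

lemma le_two_pow_of_bitLength_le {x : Int} {e : Nat} (hx : 0 ≤ x)
    (h : PySem.Int.bitLength x ≤ e) : x < 2 ^ e := by
  have h1 := PySem.Int.lt_two_pow_bitLength x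
  have h2 : (2:Nat) ^ PySem.Int.bitLength x ≤ 2 ^ e :=
    Nat.pow_le_pow_right (by norm_num) h
  have hpow : (((2:Nat) ^ e : Nat) : Int) = (2:Int) ^ e := by push_cast; ring
  omega

lemma ncVal_nonneg (M c : Int) : 0 ≤ ncVal M c := by
  unfold ncVal
  split_ifs
  · positivity
  · omega

lemma nVal_nonneg (m M c e : Int) : 0 ≤ nVal m M c e := by
  have := ncVal_nonneg M c
  unfold nVal
  split_ifs <;> omega

lemma ncVal_pos_iff {M c : Int} (hc : 0 < c) : (0 < ncVal M c ↔ c ≤ M) := by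
  unfold ncVal
  constructor
  · intro h
    by_contra hcm
    have hq : PySem.Int.floordiv M c < 1 := by
      rw [PySem.Int.floordiv_lt_iff_lt_mul hc]; omega
    simp only [show ¬ (0 < PySem.Int.floordiv M c) by omega, if_false] at h
    omega
  · intro h
    have hq : 1 ≤ PySem.Int.floordiv M c := by
      rw [PySem.Int.le_floordiv_iff_mul_le hc]; omega
    have hbl : PySem.Int.bitLength (PySem.Int.floordiv M c) ≠ 0 := by
      intro h0
      have := le_two_pow_of_bitLength_le (x := PySem.Int.floordiv M c) (e := 0) (by omega) (by omega)
      simp at this; omega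
    simp only [show (0:Int) < PySem.Int.floordiv M c by omega, if_true]
    omega

-- one c-step: doubling c drops ncVal by one (when the loop condition on c holds)
lemma ncVal_step {M c : Int} (hc : 0 < c) (hcm : c ≤ M) :
    ncVal M (2 * c) = ncVal M c - 1 := by
  have hq : 1 ≤ PySem.Int.floordiv M c := by
    rw [PySem.Int.le_floordiv_iff_mul_le hc]; omega
  have hhalf : PySem.Int.floordiv M (2 * c) = PySem.Int.floordiv (PySem.Int.floordiv M c) 2 := by
    rw [PySem.Int.floordiv_eq_ediv_of_pos (by omega), PySem.Int.floordiv_eq_ediv_of_pos hc,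
        PySem.Int.floordiv_eq_ediv_of_pos (by omega)]
    rw [Int.ediv_ediv_of_nonneg]
    · ring_nf
    · omega
  have hblq : PySem.Int.bitLength (PySem.Int.floordiv M c)
      = PySem.Int.bitLength (PySem.Int.floordiv (PySem.Int.floordiv M c) 2) + 1 :=
    PySem.Int.bitLength_of_pos (by omega)
  have hq2 : 0 ≤ PySem.Int.floordiv (PySem.Int.floordiv M c) 2 := by
    rw [PySem.Int.le_floordiv_iff_mul_le (by norm_num)]; omega
  unfold ncVal
  rw [hhalf]
  by_cases hpos : 0 < PySem.Int.floordiv (PySem.Int.floordiv M c) 2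
  · simp only [hpos, if_true, show (0:Int) < PySem.Int.floordiv M c by omega, if_true]
    omega
  · have hz : PySem.Int.floordiv (PySem.Int.floordiv M c) 2 = 0 := by omega
    simp only [hpos, if_false, show (0:Int) < PySem.Int.floordiv M c by omega, if_true]
    rw [hblq, hz]
    simp [PySem.Int.bitLength_zero]

-- shifting helpers
lemma shiftL_one (c : Int) : c <<< (1:Nat) = 2 * c := by
  rw [Int.shiftLeft_eq]; ring

lemma shiftR_pow_succ (e : Nat) : ((2:Int) ^ (e + 1)) >>> (1:Nat) = 2 ^ e := by
  rw [Int.shiftRight_eq_div_pow]; rw [pow_succ]; norm_num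

-- peeling the fill: first c, then the fill of the doubled channel count
lemma range_map_shift (c : Int) (n : Nat) :
    (List.range (n + 1)).map (fun k : Nat => c <<< k) =
      c :: (List.range n).map (fun k : Nat => (c <<< (1:Nat)) <<< k) := by
  rw [List.range_succ_eq_map, List.map_cons, List.map_map]
  simp only [Int.shiftLeft_eq, pow_zero, mul_one, Function.comp_def]
  congr 1
  apply List.map_congr_left
  intro k _
  simp only [Nat.succ_eq_add_one]
  rw [pow_succ]
  ring

-- the m ≤ 0 regime: the l-condition always holds, only c governs the loop
lemma chanLoop_nonpos (m M : Int) (hm : m ≤ 0) :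
    ∀ (fuel : Nat) (c l : Int) (res : List Int), 0 < c → 0 ≤ l →
      (ncVal M c).toNat ≤ fuel →
      chanLoop m M fuel c l res = res ++ (List.range (ncVal M c).toNat).map (fun k : Nat => c <<< k) := by
  intro fuel
  induction fuel with
  | zero =>
    intro c l res hc hl hf
    have : (ncVal M c).toNat = 0 := by omega
    simp [chanLoop, this]
  | succ fuel ih =>
    intro c l res hc hl hf
    by_cases hcm : c ≤ M
    · have hcond : m ≤ l ∧ c ≤ M := ⟨by omega, hcm⟩
      have hstep := ncVal_step hc hcm
      have hpos := (ncVal_pos_iff hc).2 hcm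
      simp only [chanLoop, if_pos hcond]
      rw [ih (c <<< (1:Nat)) (l >>> (1:Nat)) (res ++ [c])
            (by rw [shiftL_one]; omega)
            (by rw [Int.shiftRight_eq_div_pow]; positivity)
            (by rw [shiftL_one, hstep]; omega)]
      have hn : (ncVal M c).toNat = (ncVal M (c <<< (1:Nat))).toNat + 1 := by
        rw [shiftL_one]; omega
      rw [hn, range_map_shift]
      simp
    · have h0 : ncVal M c ≤ 0 := by
        by_contra hh
        exact hcm ((ncVal_pos_iff hc).1 (by omega))
      have hz : (ncVal M c).toNat = 0 := by omega
      simp [chanLoop, hcm, hz]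

-- the l-step for the m ≥ 1 regime (e ≥ 1)
lemma nVal_step_pos {m M c : Int} (e : Nat) (hm : 1 ≤ m) (hc : 0 < c)
    (hcm : c ≤ M) (hble : PySem.Int.bitLength (m - 1) ≤ e + 1) :
    nVal m M c ((e:Int) + 1) = nVal m M (2 * c) (e:Int) + 1 := by
  have hpos := (ncVal_pos_iff hc).2 hcm
  have hstep := ncVal_step hc hcm
  have hnc0 := ncVal_nonneg M (2 * c)
  unfold nVal
  simp only [show ¬ (m ≤ 0) by omega, if_false]
  rw [hstep]
  omega

-- the m ≥ 1 regime: induction on the exponent of l = 2^e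
lemma chanLoop_pos (m M : Int) (hm : 1 ≤ m) :
    ∀ (e : Nat) (fuel : Nat) (c : Int) (res : List Int), 0 < c →
      (nVal m M c e).toNat ≤ fuel →
      chanLoop m M fuel c ((2:Int) ^ e) res
        = res ++ (List.range (nVal m M c e).toNat).map (fun k : Nat => c <<< k) := by
  intro e
  induction e with
  | zero =>
    intro fuel c res hc hf
    simp only [Nat.cast_zero] at hf ⊢
    by_cases hcond : m ≤ (2:Int) ^ (0:Nat) ∧ c ≤ M
    · -- m = 1: one iteration, then l = 0 < m stops the loop
      have hm1 : m = 1 := by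
        have := hcond.1; norm_num at this; omega
      have hbl0 : PySem.Int.bitLength (m - 1) = 0 := by
        rw [hm1]; norm_num
      have hpos := (ncVal_pos_iff hc).2 hcond.2
      have hn1 : nVal m M c 0 = 1 := by
        unfold nVal
        simp only [show ¬ (m ≤ 0) by omega, if_false, hbl0]
        omega
      obtain ⟨fuel', rfl⟩ : ∃ f, fuel = f + 1 := by
        cases fuel with
        | zero => rw [hn1] at hf; omega
        | succ f => exact ⟨f, rfl⟩
      simp only [chanLoop, if_pos hcond]
      have h1 : ((2:Int) ^ (0:Nat)) >>> (1:Nat) = 0 := by decide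
      rw [h1, hn1]
      have hstop : ∀ f, chanLoop m M f (c <<< (1:Nat)) 0 (res ++ [c]) = res ++ [c] := by
        intro f
        cases f with
        | zero => simp [chanLoop]
        | succ f => simp [chanLoop, show ¬ (m ≤ 0 ∧ c <<< (1:Nat) ≤ M) by omega]
      rw [hstop]
      simp [List.range_succ]
    · -- the loop does not run and nVal = 0
      have hn0 : (nVal m M c 0).toNat = 0 := by
        unfold nVal
        simp only [show ¬ (m ≤ 0) by omega, if_false]
        rcases Decidable.not_and_iff_or_not.mp hcond with h | h
        · have hm2 : 2 ≤ m := by norm_num at h; omega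
          have hbl : 1 ≤ PySem.Int.bitLength (m - 1) := by
            by_contra hb
            have := le_two_pow_of_bitLength_le (x := m - 1) (e := 0) (by omega) (by omega)
            simp at this; omega
          omega
        · have h0 : ncVal M c ≤ 0 := by
            by_contra hh
            exact h ((ncVal_pos_iff hc).1 (by omega))
          omega
      cases fuel with
      | zero => simp [chanLoop, hn0]
      | succ f =>
        rw [show ((2:Int) ^ (0:Nat)) = 1 by norm_num] at hcond
        simp only [chanLoop, pow_zero]
        rw [if_neg hcond]
        simp [hn0]
  | succ e ih =>
    intro fuel c res hc hf
    push_cast at hf ⊢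
    by_cases hcond : m ≤ (2:Int) ^ (e + 1) ∧ c ≤ M
    · have hpos := (ncVal_pos_iff hc).2 hcond.2
      have hble : PySem.Int.bitLength (m - 1) ≤ e + 1 :=
        bitLength_le_of_le (by omega) (by omega)
      have hn := nVal_step_pos e hm hc hcond.2 hble
      have h0' := nVal_nonneg m M (2 * c) e
      obtain ⟨fuel', rfl⟩ : ∃ f, fuel = f + 1 := by
        cases fuel with
        | zero => exfalso; omega
        | succ f => exact ⟨f, rfl⟩
      simp only [chanLoop, if_pos hcond]
      rw [shiftR_pow_succ]
      rw [ih fuel' (c <<< (1:Nat)) (res ++ [c]) (by rw [shiftL_one]; omega)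
            (by rw [shiftL_one]; omega)]
      have hnn : (nVal m M c ((e:Int) + 1)).toNat = (nVal m M (c <<< (1:Nat)) (e:Int)).toNat + 1 := by
        rw [shiftL_one]; omega
      rw [hnn, range_map_shift]
      simp
    · have hn0 : (nVal m M c ((e:Int) + 1)).toNat = 0 := by
        unfold nVal
        simp only [show ¬ (m ≤ 0) by omega, if_false]
        rcases Decidable.not_and_iff_or_not.mp hcond with h | h
        · have hbl : (e:Int) + 1 + 1 ≤ PySem.Int.bitLength (m - 1) := by
            by_contra hb
            have hble : PySem.Int.bitLength (m - 1) ≤ e + 1 := by omega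
            have := le_two_pow_of_bitLength_le (x := m - 1) (e := e + 1) (by omega) hble
            omega
          omega
        · have h0 : ncVal M c ≤ 0 := by
            by_contra hh
            exact h ((ncVal_pos_iff hc).1 (by omega))
          omega
      cases fuel with
      | zero => simp [chanLoop, hn0]
      | succ f => simp [chanLoop, hcond, hn0]

-- fuel sufficiency on Dom: max_channels ≤ 2^31 and c ≥ 1 bound the count by 64
lemma nVal_le_64 {m M c e : Int} (hc : 0 < c) (hM : M ≤ 2147483648) :
    (nVal m M c e).toNat ≤ 64 := by
  have hq : PySem.Int.floordiv M c < 2147483649 := by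
    rw [PySem.Int.floordiv_lt_iff_lt_mul hc]; nlinarith
  have hnc : ncVal M c ≤ 64 := by
    unfold ncVal
    split_ifs with hqq
    · have hb : PySem.Int.bitLength (PySem.Int.floordiv M c) ≤ 64 := by
        by_contra hb
        have h1 := PySem.Int.two_pow_bitLength_le (PySem.Int.floordiv M c) (by omega)
        have h2 : (2:Nat) ^ 64 ≤ 2 ^ (PySem.Int.bitLength (PySem.Int.floordiv M c) - 1) :=
          Nat.pow_le_pow_right (by norm_num) (by omega)
        have h3 : (2:Nat) ^ 64 = 18446744073709551616 := by norm_num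
        omega
      exact_mod_cast hb
    · norm_num
  unfold nVal
  split_ifs <;> omega

-- exponents produced by closest_log2
lemma bitLength_pos_of_one_le {x : Int} (hx : 1 ≤ x) : 1 ≤ PySem.Int.bitLength x := by
  by_contra hb
  have := le_two_pow_of_bitLength_le (x := x) (e := 0) (by omega) (by omega)
  simp at this; omega

lemma closest_log2_neg_ge (x : Int) : 0 ≤ closest_log2 x (-1) := by
  unfold closest_log2
  split_ifs with h
  · norm_num
  · have := bitLength_pos_of_one_le (x := x - 1) (by omega)
    omega

-- B's inline count is nVal (definitional)
lemma alt_n_eq (m M c0 e : Int) :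
    (if m ≤ 0 then (if 0 < PySem.Int.floordiv M c0 then (PySem.Int.bitLength (PySem.Int.floordiv M c0) : Int) else 0)
     else min (max (e - (PySem.Int.bitLength (m - 1) : Int) + 1) 0)
              (if 0 < PySem.Int.floordiv M c0 then (PySem.Int.bitLength (PySem.Int.floordiv M c0) : Int) else 0))
      = nVal m M c0 e := by
  unfold nVal ncVal
  rfl

-- combine the two regimes, with fuel 64 sufficient on Dom
lemma chanLoop_eq_fill (m M c : Int) (e : Nat) (h : Int) (hc : 0 < c) (hM : M ≤ 2147483648) :
    chanLoop m M 64 c ((2:Int) ^ e) [h]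
      = h :: (List.range (nVal m M c e).toNat).map (fun k : Nat => c <<< k) := by
  by_cases hm : m ≤ 0
  · have hn : nVal m M c e = ncVal M c := by unfold nVal; simp [hm]
    rw [chanLoop_nonpos m M hm 64 c _ [h] hc (by positivity)
          (by have := nVal_le_64 (m := m) (e := (e:Int)) hc hM; omega)]
    rw [hn]
    rfl
  · rw [chanLoop_pos m M (by omega) e 64 c [h] hc (nVal_le_64 hc hM)]
    rfl

-- ===== VERDICT (by name: the statement is the Claim_ definition above) =====
theorem channel_seq_py_spec : Claim_equal_channel_seq_py := by
  intro in_shape m M mc hDom hPre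
  unfold Spec_channel_seq_py channel_seq_py channel_seq_py_alt
  have hM : M ≤ 2147483648 := by
    simp only [Dom_channel_seq_py, pvDomInt, Bool.and_eq_true, decide_eq_true_eq] at hDom
    exact hDom.1.2.2
  unfold Pre_channel_seq_py at hPre
  rcases hh : PySem.List.pyGet? in_shape 0 with _ | h
  · exfalso
    rw [PySem.List.pyGet?_eq_none_iff] at hh
    exact hh (by unfold PySem.Raise.InRange; omega)
  rcases hmn : PySem.List.min? (PySem.List.slice in_shape (some 1) none) (fun y => y) with _ | mn
  · exfalso
    rw [PySem.List.min?_eq_none_iff, PySem.List.slice_from_one] at hmn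
    have := congrArg List.length hmn
    simp at this
    omega
  simp only [Option.elim]
  have hc : 0 < max mc ((2:Int) ^ (closest_log2 h 0).toNat) := by
    have h2 : (0:Int) < (2:Int) ^ (closest_log2 h 0).toNat := by positivity
    exact lt_of_lt_of_le h2 (le_max_right _ _)
  rw [show closest_log2B = closest_log2 from rfl]
  rw [chanLoop_eq_fill m M _ _ h hc hM]
  rw [alt_n_eq]
  rw [Int.toNat_of_nonneg (closest_log2_neg_ge mn)]
  generalize PySem.List.pyGet?
      (h :: (List.range (nVal m M (max mc ((2:Int) ^ (closest_log2 h 0).toNat)) (closest_log2 mn (-1))).toNat).map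
        (fun k : Nat => (max mc ((2:Int) ^ (closest_log2 h 0).toNat)) <<< k)) (-1) = o
  cases o <;> rfl
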